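-- pv_equiv track=rewrite | github.com/HazemElbehary/reasoning-assignment | ReasoningCode.py | Rename_variables
-- ===== SOURCE A (Python) =====
-- def Rename_variables(lst):
--     vars = ["w", "x", "y", "z"]
--     i =0
--     for clause in range(len(lst)):
--         # lst[clause].replace(var in vars, vars[i])
--         cls =lst[clause]
--         for ch in cls:
--             if ch in vars:
--                 cls = cls.replace(ch,vars[i])
--         lst[clause] = cls
--         i+=1
--     return lst
-- ===== SOURCE B (Python) =====
-- def Rename_variables(lst):
--     names = ["w", "x", "y", "z"]
--     for idx, clause in enumerate(lst):
--         lst[idx] = ''.join(names[idx] if c in names else c for c in clause)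
--     return lst
-- ===== Notes on version B (the rewrite author's own statement) =====
-- stated objective: simpler
-- what changed: B makes a single left-to-right pass over each clause mapping every variable character directly to vars[idx], instead of A's loop of repeated full-string str.replace rescans (one per variable occurrence).
import Mathlib
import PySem

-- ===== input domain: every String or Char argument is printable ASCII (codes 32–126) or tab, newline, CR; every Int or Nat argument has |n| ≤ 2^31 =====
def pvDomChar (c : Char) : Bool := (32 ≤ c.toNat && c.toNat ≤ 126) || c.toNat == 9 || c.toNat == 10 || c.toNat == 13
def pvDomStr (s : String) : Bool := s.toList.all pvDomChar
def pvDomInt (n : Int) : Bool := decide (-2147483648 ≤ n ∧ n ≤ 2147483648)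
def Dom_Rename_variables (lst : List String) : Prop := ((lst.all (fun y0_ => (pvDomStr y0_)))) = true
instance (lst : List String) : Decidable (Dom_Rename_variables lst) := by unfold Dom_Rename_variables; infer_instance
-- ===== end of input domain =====

-- B replaces A's repeated full-string str.replace rescans by one direct per-character
-- translation pass per clause (simpler single pass). Both A and B mutate the argument
-- list in place in Python; the equivalence proved here is about the return value.

-- ===== PORT A =====
def Rename_variables (lst : List String) : List String :=
  let vars : List String := ["w", "x", "y", "z"]
  ((PySem.List.pyRange 0 (lst.length : Int) 1).foldl
    (fun (p : List String × Int) clause =>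
      let cls := (PySem.List.pyGet? p.1 clause).getD ""
      let cls := cls.toList.foldl
        (fun cls ch =>
          if String.ofList [ch] ∈ vars then
            PySem.Str.replace cls (String.ofList [ch]) ((PySem.List.pyGet? vars p.2).getD "")
          else cls) cls
      (p.1.set clause.toNat cls, p.2 + 1))
    (lst, 0)).1

-- ===== PORT B =====
def Rename_variables_alt (lst : List String) : List String :=
  let vars : List String := ["w", "x", "y", "z"]
  (PySem.List.enumerate lst).map (fun p =>
    PySem.Str.join "" (p.2.toList.map (fun c =>
      if String.ofList [c] ∈ vars then (PySem.List.pyGet? vars p.1).getD "" else String.ofList [c])))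

-- ===== PRECONDITION & SPEC =====
-- Pre_ excludes exactly the lists in which a clause at index ≥ 4 contains one of the
-- variable characters w/x/y/z: there A evaluates vars[i] with i ≥ 4 and raises IndexError
-- (and B raises the same way).
def Pre_Rename_variables (lst : List String) : Prop :=
  ∀ s ∈ lst.drop 4, ∀ c ∈ s.toList, c ∉ (['w', 'x', 'y', 'z'] : List Char)
instance (lst : List String) : Decidable (Pre_Rename_variables lst) := by
  unfold Pre_Rename_variables; infer_instance

def pvWitness_Rename_variables : List String := ["x&y", "~w|z"]

def Spec_Rename_variables (lst : List String) (out : List String) : Prop := out = Rename_variables_alt lst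
instance (lst : List String) (out : List String) : Decidable (Spec_Rename_variables lst out) := by unfold Spec_Rename_variables; infer_instance

-- ===== CLAIM (what is proved, stated in full; the proofs are below) =====
def Claim_equal_Rename_variables : Prop := ∀ (lst : List String), Dom_Rename_variables lst → Pre_Rename_variables lst → Spec_Rename_variables lst (Rename_variables lst)

-- ===== LEMMAS AND PROOFS =====

def pvVarsC : List Char := ['w', 'x', 'y', 'z']
def pvVarsS : List String := ["w", "x", "y", "z"]

theorem pv_mem_varsS (ch : Char) :
    (String.ofList [ch] ∈ pvVarsS) ↔ ch ∈ pvVarsC := by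
  have key : ∀ a : Char, String.ofList [ch] = String.ofList [a] ↔ ch = a := by
    intro a
    constructor
    · intro h
      have := congrArg String.toList h
      simpa using this
    · intro h; rw [h]
  simp [pvVarsS, pvVarsC, List.mem_cons,
    show ("w" : String) = String.ofList ['w'] from rfl,
    show ("x" : String) = String.ofList ['x'] from rfl,
    show ("y" : String) = String.ofList ['y'] from rfl,
    show ("z" : String) = String.ofList ['z'] from rfl,
    key]

-- single-character replace is a character map
theorem pv_go_single (a b : Char) :
    ∀ (fuel : Nat) (l acc : List Char), l.length ≤ fuel →
      PySem.Chars.replace.go [a] [b] fuel l acc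
        = acc.reverse ++ l.map (fun c => if c = a then b else c) := by
  intro fuel
  induction fuel with
  | zero =>
      intro l acc h
      have : l = [] := List.length_eq_zero_iff.mp (Nat.le_zero.mp h)
      subst this
      simp [PySem.Chars.replace.go]
  | succ n ih =>
      intro l acc h
      cases l with
      | nil => simp [PySem.Chars.replace.go]
      | cons c t =>
          simp only [PySem.Chars.replace.go]
          by_cases hc : a = c
          · subst hc
            simp only [List.isPrefixOf, BEq.rfl, Bool.and_self, if_pos]
            have hd : List.drop [a].length (a :: t) = t := by simp
            have hr : [b].reverse ++ acc = b :: acc := by simp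
            rw [hd, hr, ih t (b :: acc) (by simpa using Nat.le_of_succ_le_succ h)]
            simp
          · have hpre : [a].isPrefixOf (c :: t) = false := by
              simp [List.isPrefixOf, hc]
            rw [hpre]
            simp only [Bool.false_eq_true, if_false]
            rw [ih t (c :: acc) (by simpa using Nat.le_of_succ_le_succ h)]
            simp [Ne.symm hc]

theorem pv_replace_single (a b : Char) (l : List Char) :
    PySem.Chars.replace l [a] [b] = l.map (fun c => if c = a then b else c) := by
  unfold PySem.Chars.replace
  simp only [List.isEmpty_cons, Bool.false_eq_true, if_false]
  simpa using pv_go_single a b l.length l [] (le_refl _)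

-- the inner String fold, moved to the List Char level
theorem pv_inner_toList (v : String) (l : List Char) (s : String) :
    (l.foldl (fun cls ch =>
        if String.ofList [ch] ∈ pvVarsS then PySem.Str.replace cls (String.ofList [ch]) v else cls) s).toList
      = l.foldl (fun cls ch =>
        if ch ∈ pvVarsC then PySem.Chars.replace cls [ch] v.toList else cls) s.toList := by
  induction l generalizing s with
  | nil => rfl
  | cons ch t ih =>
      simp only [List.foldl_cons]
      by_cases hch : ch ∈ pvVarsC
      · rw [if_pos ((pv_mem_varsS ch).mpr hch), if_pos hch, ih]
        congr 1
        rw [PySem.Str.toList_replace]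
        simp
      · rw [if_neg (fun h => hch ((pv_mem_varsS ch).mp h)), if_neg hch, ih]

-- invariant of A's inner loop, single-character replacement string [b]
theorem pv_inner_char (b : Char) :
    ∀ (suf pre : List Char),
      suf.foldl (fun cls ch => if ch ∈ pvVarsC then PySem.Chars.replace cls [ch] [b] else cls)
        ((pre ++ suf).map (fun c => if c ∈ pvVarsC ∧ c ∈ pre then b else c))
      = (pre ++ suf).map (fun c => if c ∈ pvVarsC ∧ c ∈ pre ++ suf then b else c) := by
  intro suf
  induction suf with
  | nil => intro pre; simp
  | cons ch t ih =>
      intro pre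
      simp only [List.foldl_cons]
      have hstep :
          (if ch ∈ pvVarsC then
              PySem.Chars.replace ((pre ++ ch :: t).map (fun c => if c ∈ pvVarsC ∧ c ∈ pre then b else c)) [ch] [b]
            else ((pre ++ ch :: t).map (fun c => if c ∈ pvVarsC ∧ c ∈ pre then b else c)))
          = (pre ++ ch :: t).map (fun c => if c ∈ pvVarsC ∧ c ∈ pre ++ [ch] then b else c) := by
        by_cases hch : ch ∈ pvVarsC
        · rw [if_pos hch, pv_replace_single, List.map_map]
          apply List.map_congr_left
          intro c _
          by_cases h1 : c ∈ pvVarsC ∧ c ∈ pre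
          · simp only [Function.comp_apply, if_pos h1,
              if_pos (And.intro h1.1 (List.mem_append.mpr (Or.inl h1.2)))]
            split <;> rfl
          · simp only [Function.comp_apply, if_neg h1]
            by_cases h2 : c = ch
            · subst h2
              simp [hch]
            · simp only [if_neg h2]
              rw [if_neg]
              intro hcon
              rcases List.mem_append.mp hcon.2 with hp | hs
              · exact h1 ⟨hcon.1, hp⟩
              · exact h2 (List.mem_singleton.mp hs)
        · rw [if_neg hch]
          apply List.map_congr_left
          intro c _
          by_cases h1 : c ∈ pvVarsC ∧ c ∈ pre
          · rw [if_pos h1, if_pos ⟨h1.1, List.mem_append.mpr (Or.inl h1.2)⟩]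
          · rw [if_neg h1, if_neg]
            intro hcon
            rcases List.mem_append.mp hcon.2 with hp | hs
            · exact h1 ⟨hcon.1, hp⟩
            · exact hch (List.mem_singleton.mp hs ▸ hcon.1)
      rw [hstep]
      have horig : pre ++ ch :: t = (pre ++ [ch]) ++ t := by simp
      rw [horig]
      exact ih (pre ++ [ch])

theorem pv_inner_char_full (b : Char) (l : List Char) :
    l.foldl (fun cls ch => if ch ∈ pvVarsC then PySem.Chars.replace cls [ch] [b] else cls) l
      = l.map (fun c => if c ∈ pvVarsC then b else c) := by
  have h := pv_inner_char b l []
  simp only [List.nil_append, List.not_mem_nil, and_false, if_false, List.map_id'] at h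
  rw [h]
  apply List.map_congr_left
  intro c hc
  by_cases h1 : c ∈ pvVarsC
  · rw [if_pos ⟨h1, hc⟩, if_pos h1]
  · rw [if_neg (fun hcon => h1 hcon.1), if_neg h1]

-- A's inner loop does nothing when the clause has no variable characters
theorem pv_inner_id (v : List Char) (l : List Char) (h : ∀ c ∈ l, c ∉ pvVarsC) :
    ∀ s : List Char,
      l.foldl (fun cls ch => if ch ∈ pvVarsC then PySem.Chars.replace cls [ch] v else cls) s = s := by
  induction l with
  | nil => intro s; rfl
  | cons ch t ih =>
      intro s
      simp only [List.foldl_cons, if_neg (h ch List.mem_cons_self)]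
      exact ih (fun c hc => h c (List.mem_cons_of_mem _ hc)) s

-- B's per-clause value, at the List Char level
theorem pv_B_clause (rep : String) (l : List Char) :
    (PySem.Str.join "" (l.map (fun c =>
        if String.ofList [c] ∈ pvVarsS then rep else String.ofList [c]))).toList
      = PySem.Chars.join []
          (l.map (fun c => if c ∈ pvVarsC then rep.toList else [c])) := by
  rw [PySem.Str.toList_join, List.map_map]
  congr 1
  apply List.map_congr_left
  intro c _
  simp only [Function.comp_apply]
  by_cases h : c ∈ pvVarsC
  · rw [if_pos ((pv_mem_varsS c).mpr h), if_pos h]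
  · rw [if_neg (fun hx => h ((pv_mem_varsS c).mp hx)), if_neg h]
    simp

theorem pv_join_singleton_map (f : Char → Char) (l : List Char) :
    PySem.Chars.join [] (l.map (fun c => [f c])) = l.map f := by
  have := PySem.Chars.join_nil_singletons (l.map f)
  rw [List.map_map] at this
  exact this

-- the per-clause agreement: A's inner loop = B's translation pass
theorem pv_clause_eq (i : Nat) (s : String)
    (h : 4 ≤ i → ∀ c ∈ s.toList, c ∉ pvVarsC) :
    s.toList.foldl (fun cls ch =>
        if String.ofList [ch] ∈ pvVarsS then
          PySem.Str.replace cls (String.ofList [ch]) ((PySem.List.pyGet? pvVarsS (i : Int)).getD "")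
        else cls) s
      = PySem.Str.join "" (s.toList.map (fun c =>
          if String.ofList [c] ∈ pvVarsS then (PySem.List.pyGet? pvVarsS (i : Int)).getD ""
          else String.ofList [c])) := by
  set rep : String := (PySem.List.pyGet? pvVarsS (i : Int)).getD "" with hrep
  apply String.toList_injective
  rw [pv_inner_toList, pv_B_clause]
  by_cases hi : i < 4
  · -- rep is one of "w" "x" "y" "z": a single character
    have hsingle : ∃ b : Char, b ∈ pvVarsC ∧ rep.toList = [b] := by
      interval_cases i
      · exact ⟨'w', by decide, by simp [hrep, pvVarsS]⟩
      · exact ⟨'x', by decide, by simp [hrep, pvVarsS]⟩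
      · exact ⟨'y', by decide, by simp [hrep, pvVarsS]⟩
      · exact ⟨'z', by decide, by simp [hrep, pvVarsS]⟩
    obtain ⟨b, _, hb⟩ := hsingle
    rw [hb, pv_inner_char_full]
    have : s.toList.map (fun c => if c ∈ pvVarsC then [b] else [c])
        = s.toList.map (fun c => [if c ∈ pvVarsC then b else c]) := by
      apply List.map_congr_left; intro c _; split <;> rfl
    rw [this, pv_join_singleton_map]
  · -- i ≥ 4: no variable characters in s, both sides are s unchanged
    have hno : ∀ c ∈ s.toList, c ∉ pvVarsC := h (Nat.le_of_not_lt hi)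
    rw [pv_inner_id rep.toList s.toList hno]
    have : s.toList.map (fun c => if c ∈ pvVarsC then rep.toList else [c])
        = s.toList.map (fun c => [c]) := by
      apply List.map_congr_left; intro c hc; rw [if_neg (hno c hc)]
    rw [this]
    rw [show (fun c : Char => [c]) = (fun c => [id c]) from rfl, pv_join_singleton_map id s.toList, List.map_id]

-- PySem.List.enumerate via List.zipIdx
theorem pv_enumerate_eq (l : List String) :
    ∀ n : Nat, PySem.List.enumerate l (n : Int)
      = (l.zipIdx n).map (fun q => (((q.2 : Nat) : Int), q.1)) := by
  induction l with
  | nil => intro n; rfl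
  | cons x t ih =>
      intro n
      rw [List.zipIdx_cons, List.map_cons]
      show (↑n, x) :: PySem.List.enumerate t ((n : Int) + 1) = _
      have : ((n : Int) + 1) = ((n + 1 : Nat) : Int) := by push_cast; ring
      rw [this, ih (n + 1)]

-- A's outer loop: fold over range with in-place set = map over zipIdx
theorem pv_outer (g : Int → String → String) :
    ∀ (todo done : List String),
      ((PySem.List.pyRange (done.length : Int) ((done.length : Int) + (todo.length : Int)) 1).foldl
        (fun (p : List String × Int) clause =>
          (p.1.set clause.toNat (g p.2 ((PySem.List.pyGet? p.1 clause).getD "")), p.2 + 1))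
        (done ++ todo, (done.length : Int))).1
      = done ++ (todo.zipIdx done.length).map (fun q => g ((q.2 : Nat) : Int) q.1) := by
  intro todo
  induction todo with
  | nil =>
      intro done
      rw [PySem.List.pyRange_one_eq_nil (by simp)]
      simp
  | cons s t ih =>
      intro done
      rw [PySem.List.pyRange_one_cons (by simp only [List.length_cons]; push_cast; omega)]
      simp only [List.foldl_cons]
      have hget : (PySem.List.pyGet? (done ++ s :: t) ((done.length : Nat) : Int)).getD ""
          = s := by
        rw [PySem.List.pyGet?_natCast]
        rw [List.getElem?_append_right (le_refl done.length)]
        simp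
      have hset : (done ++ s :: t).set ((done.length : Int)).toNat
            (g (done.length : Int) s)
          = (done ++ [g (done.length : Int) s]) ++ t := by
        rw [Int.toNat_natCast, List.set_append]
        simp
      rw [hget, hset]
      have hlen : ((done.length : Int) + 1) = (((done ++ [g (done.length : Int) s]).length : Nat) : Int) := by
        simp
      have hbound : (done.length : Int) + ((s :: t).length : Int)
          = (((done ++ [g (done.length : Int) s]).length : Nat) : Int) + ((t.length : Nat) : Int) := by
        simp; ring
      rw [hlen, hbound, ih (done ++ [g (done.length : Int) s])]
      rw [List.zipIdx_cons, List.map_cons]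
      simp

-- ===== VERDICT (by name: the statement is the Claim_ definition above) =====
theorem Rename_variables_spec : Claim_equal_Rename_variables := by
  intro lst _ hpre
  unfold Spec_Rename_variables Rename_variables Rename_variables_alt
  have houter := pv_outer
    (fun i s => s.toList.foldl (fun cls ch =>
        if String.ofList [ch] ∈ pvVarsS then
          PySem.Str.replace cls (String.ofList [ch]) ((PySem.List.pyGet? pvVarsS i).getD "")
        else cls) s) lst []
  simp only [List.length_nil, Nat.cast_zero, List.nil_append, zero_add] at houter
  rw [show pvVarsS = ["w", "x", "y", "z"] from rfl] at houter
  rw [houter]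
  have henum := pv_enumerate_eq lst 0
  simp only [Nat.cast_zero] at henum
  rw [henum, List.map_map]
  apply List.map_congr_left
  intro q hq
  have hcond : 4 ≤ q.2 → ∀ c ∈ q.1.toList, c ∉ pvVarsC := by
    intro h4 c hc
    have hgetq : lst[q.2]? = some q.1 := by
      obtain ⟨h1, h2, h3⟩ := List.mem_zipIdx hq
      rw [List.getElem?_eq_some_iff]
      exact ⟨by omega, by simpa using h3.symm⟩
    have hmem : q.1 ∈ lst.drop 4 := by
      have hdrop : (lst.drop 4)[q.2 - 4]? = some q.1 := by
        rw [List.getElem?_drop]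
        rwa [Nat.add_sub_cancel' h4]
      exact List.mem_of_getElem? hdrop
    exact hpre q.1 hmem c hc
  have hq' := pv_clause_eq q.2 q.1 hcond
  rw [show pvVarsS = ["w", "x", "y", "z"] from rfl] at hq'
  exact hq'
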